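-- pv_equiv track=rewrite | github.com/zoeezhang3/CodePath | session_3_unit_1.py | arrange_guest_arrival_order
-- ===== SOURCE A (Python) =====
-- def arrange_guest_arrival_order(arrival_pattern):
--   guest_order = []
--   stack = []
--
--   for i in range(len(arrival_pattern)+1):
--     stack.append(str(i+1))
--     if i == len(arrival_pattern) or arrival_pattern[i] == 'I':
--       while stack:
--         guest_order.append(stack.pop())
--
--   return ''.join(guest_order)
-- ===== SOURCE B (Python) =====
-- def arrange_guest_arrival_order(arrival_pattern):
--     # Emit descending number ranges directly at each 'I' (and at the end),
--     # instead of simulating a push/pop stack.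
--     out = []
--     lo = 1
--     for hi, ch in enumerate(arrival_pattern, start=1):
--         if ch == 'I':
--             out.extend(str(x) for x in range(hi, lo - 1, -1))
--             lo = hi + 1
--     out.extend(str(x) for x in range(len(arrival_pattern) + 1, lo - 1, -1))
--     return ''.join(out)
-- ===== Notes on version B (the rewrite author's own statement) =====
-- stated objective: alternative
-- what changed: B drops A's push/pop stack simulation: it tracks only the start of the current descending block and emits that block's numbers directly as a descending range at each 'I' (and once at the end).
import Mathlib
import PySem

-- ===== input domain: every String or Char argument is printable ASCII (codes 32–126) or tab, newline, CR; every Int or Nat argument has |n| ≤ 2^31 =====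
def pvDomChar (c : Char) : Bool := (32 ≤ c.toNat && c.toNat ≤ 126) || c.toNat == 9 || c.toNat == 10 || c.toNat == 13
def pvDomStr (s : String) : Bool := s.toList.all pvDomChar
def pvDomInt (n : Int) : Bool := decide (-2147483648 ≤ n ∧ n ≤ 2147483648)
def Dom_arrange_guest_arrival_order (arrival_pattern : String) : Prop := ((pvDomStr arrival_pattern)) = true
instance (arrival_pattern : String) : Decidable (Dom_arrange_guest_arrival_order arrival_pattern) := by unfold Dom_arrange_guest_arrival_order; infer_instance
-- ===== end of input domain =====

-- B replaces A's push/pop stack simulation by emitting the descending number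
-- range directly at each 'I' (and at the end); objective: simpler/alternative.

-- ===== PORT A =====
-- the `while stack: guest_order.append(stack.pop())` loop of A
def pvFlush (g st : List String) : List String :=
  if h : st = [] then g
  else pvFlush (g ++ [st.getLast h]) st.dropLast
  termination_by st.length
  decreasing_by
    have := List.length_pos_of_ne_nil h
    simp [List.length_dropLast]
    omega

def arrange_guest_arrival_order (arrival_pattern : String) : String :=
  let n : Int := PySem.Str.len arrival_pattern
  let r := (PySem.List.pyRange 0 (n + 1) 1).foldl
    (fun (acc : List String × List String) i =>
      let stack := acc.2 ++ [PySem.Int.toStr (i + 1)]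
      if i = n ∨ PySem.Str.pyGet? arrival_pattern i = some 'I' then
        (pvFlush acc.1 stack, ([] : List String))
      else (acc.1, stack))
    ([], [])
  PySem.Str.join "" r.1

-- ===== PORT B =====
-- str(x) for x in range(hi, lo - 1, -1)
def pvDescStrs (hi lo : Int) : List String :=
  (PySem.List.pyRange hi (lo - 1) (-1)).map PySem.Int.toStr

def arrange_guest_arrival_order_alt (arrival_pattern : String) : String :=
  let r := (PySem.List.enumerate arrival_pattern.toList 1).foldl
    (fun (acc : List String × Int) p =>
      if p.2 = 'I' then (acc.1 ++ pvDescStrs p.1 acc.2, p.1 + 1) else acc)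
    ([], 1)
  PySem.Str.join "" (r.1 ++ pvDescStrs (PySem.Str.len arrival_pattern + 1) r.2)

-- ===== PRECONDITION & SPEC =====
def Spec_arrange_guest_arrival_order (arrival_pattern : String) (out : String) : Prop := out = arrange_guest_arrival_order_alt arrival_pattern
instance (arrival_pattern : String) (out : String) : Decidable (Spec_arrange_guest_arrival_order arrival_pattern out) := by unfold Spec_arrange_guest_arrival_order; infer_instance

-- ===== CLAIM (what is proved, stated in full; the proofs are below) =====
def Claim_equal_arrange_guest_arrival_order : Prop := ∀ (arrival_pattern : String), Dom_arrange_guest_arrival_order arrival_pattern → Spec_arrange_guest_arrival_order arrival_pattern (arrange_guest_arrival_order arrival_pattern)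

-- ===== LEMMAS AND PROOFS =====

-- str(x) for x in range(lo, cur) (ascending): the shape of A's pending stack
def pvAscStrs (lo cur : Int) : List String :=
  (PySem.List.pyRange lo cur 1).map PySem.Int.toStr

-- common reference function: the output blocks of both programs
def pvCore : List Char → Int → Int → List String
  | [], lo, cur => pvDescStrs cur lo
  | c :: cs, lo, cur =>
      if c = 'I' then pvDescStrs cur lo ++ pvCore cs (cur + 1) (cur + 1)
      else pvCore cs lo (cur + 1)

theorem pvFlush_eq (st : List String) : ∀ (g : List String), pvFlush g st = g ++ st.reverse := by
  induction st using List.reverseRecOn with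
  | nil => intro g; rw [pvFlush]; simp
  | append_singleton ys y ih =>
      intro g
      rw [pvFlush, dif_neg (by simp)]
      simp only [List.getLast_concat, List.dropLast_concat]
      rw [ih]
      simp

theorem pvDesc_eq_rev_asc (lo cur : Int) :
    pvDescStrs cur lo = (pvAscStrs lo (cur + 1)).reverse := by
  have h : lo - 1 + 1 = lo := by ring
  simp [pvDescStrs, pvAscStrs, PySem.List.pyRange_neg_one_eq_reverse, h]

theorem pvAsc_snoc (lo cur : Int) (h : lo ≤ cur) :
    pvAscStrs lo cur ++ [PySem.Int.toStr cur] = pvAscStrs lo (cur + 1) := by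
  simp [pvAscStrs, PySem.List.pyRange_one_succ_right h]

theorem pvAsc_nil (cur : Int) : pvAscStrs cur cur = [] := by
  simp [pvAscStrs, PySem.List.pyRange_one_eq_nil le_rfl]

-- A's loop body after the range/index bookkeeping has been turned into enumerate
def pvStepA (acc : List String × List String) (p : Int × Char) : List String × List String :=
  let stack := acc.2 ++ [PySem.Int.toStr (p.1 + 1)]
  if p.2 = 'I' then (acc.1 ++ stack.reverse, ([] : List String)) else (acc.1, stack)

theorem A_loop (cs : List Char) : ∀ (i0 lo m : Int) (g : List String),
    lo ≤ i0 + 1 → m = i0 + cs.length + 1 →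
    (let r := (PySem.List.enumerate cs i0).foldl pvStepA (g, pvAscStrs lo (i0 + 1));
     r.1 ++ (r.2 ++ [PySem.Int.toStr m]).reverse) = g ++ pvCore cs lo (i0 + 1) := by
  induction cs with
  | nil =>
      intro i0 lo m g hlo hm
      simp only [List.length_nil, Nat.cast_zero, add_zero] at hm
      subst hm
      simp [PySem.List.enumerate, pvCore, pvAsc_snoc lo (i0 + 1) hlo,
        pvDesc_eq_rev_asc]
  | cons c cs ih =>
      intro i0 lo m g hlo hm
      rw [PySem.List.enumerate_cons]
      simp only [List.foldl_cons]
      by_cases hc : c = 'I'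
      · have h2 : pvAscStrs (i0 + 2) (i0 + 1 + 1) = [] := by
          rw [show i0 + 1 + 1 = i0 + 2 by ring]; exact pvAsc_nil _
        have h1 : pvStepA (g, pvAscStrs lo (i0 + 1)) (i0, c)
            = (g ++ pvDescStrs (i0 + 1) lo, pvAscStrs (i0 + 2) (i0 + 1 + 1)) := by
          simp [pvStepA, hc, pvAsc_snoc lo (i0 + 1) hlo, pvDesc_eq_rev_asc, h2]
        rw [h1, ih (i0 + 1) (i0 + 2) m _ (by omega)
          (by simp only [List.length_cons] at hm; push_cast at hm ⊢; omega)]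
        simp [pvCore, hc]
        ring_nf
      · have h1 : pvStepA (g, pvAscStrs lo (i0 + 1)) (i0, c)
            = (g, pvAscStrs lo (i0 + 1 + 1)) := by
          simp [pvStepA, hc, pvAsc_snoc lo (i0 + 1) hlo]
        rw [h1, ih (i0 + 1) lo m _ (by omega) (by simp only [List.length_cons] at hm; push_cast at hm ⊢; omega)]
        simp [pvCore, hc]

theorem B_loop (cs : List Char) : ∀ (k lo m : Int) (out : List String),
    m = k + cs.length →
    (let r := (PySem.List.enumerate cs k).foldl
        (fun (acc : List String × Int) p =>
          if p.2 = 'I' then (acc.1 ++ pvDescStrs p.1 acc.2, p.1 + 1) else acc)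
        (out, lo);
     r.1 ++ pvDescStrs m r.2) = out ++ pvCore cs lo k := by
  induction cs with
  | nil =>
      intro k lo m out hm
      simp only [List.length_nil, Nat.cast_zero, add_zero] at hm
      subst hm
      simp [PySem.List.enumerate, pvCore]
  | cons c cs ih =>
      intro k lo m out hm
      rw [PySem.List.enumerate_cons]
      simp only [List.foldl_cons]
      by_cases hc : c = 'I'
      · simp only [hc, if_true]
        rw [ih (k + 1) (k + 1) m _ (by simp only [List.length_cons] at hm; push_cast at hm ⊢; omega)]
        simp [pvCore]
      · simp only [eq_false hc, if_false]
        rw [ih (k + 1) lo m _ (by simp only [List.length_cons] at hm; push_cast at hm ⊢; omega)]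
        simp [pvCore, hc]

-- A's result, characterised through pvCore
theorem A_eq_core (s : String) :
    arrange_guest_arrival_order s = PySem.Str.join "" (pvCore s.toList 1 1) := by
  unfold arrange_guest_arrival_order
  simp only []
  have hn : (0 : Int) ≤ (PySem.Str.len s) := by simp
  rw [PySem.List.pyRange_one_succ_right hn, List.foldl_append]
  -- on range(0, n) the i == n branch never fires and s[i] is in range
  have hcongr : (PySem.List.pyRange 0 (PySem.Str.len s) 1).foldl
      (fun (acc : List String × List String) i =>
        if i = PySem.Str.len s ∨ PySem.Str.pyGet? s i = some 'I' then
          (pvFlush acc.1 (acc.2 ++ [PySem.Int.toStr (i + 1)]), ([] : List String))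
        else (acc.1, acc.2 ++ [PySem.Int.toStr (i + 1)])) ([], [])
      = (PySem.List.pyRange 0 (PySem.Str.len s) 1).foldl
        (fun acc i => pvStepA acc (i, PySem.List.pyGetD s.toList i ' ')) ([], []) := by
    apply PySem.List.foldl_congr_mem
    intro acc i hi
    rw [PySem.List.mem_pyRange_one] at hi
    have hlen : i < ((s.toList.length : Int)) := by
      have := hi.2; simpa using this
    have hne : i ≠ PySem.Str.len s := by
      simp only [PySem.Str.len_eq]; omega
    have hget : PySem.Str.pyGet? s i = some (s.toList[i.toNat]) := by
      simp only [PySem.Str.pyGet?_eq]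
      exact PySem.List.pyGet?_eq_some_getElem s.toList hi.1 hlen
    have hgetD : PySem.List.pyGetD s.toList i ' ' = s.toList[i.toNat] :=
      PySem.List.pyGetD_eq_getElem s.toList ' ' hi.1 hlen
    simp only [pvStepA, hget, hgetD, hne, false_or, pvFlush_eq, Option.some.injEq]
  rw [hcongr]
  have hmap : (PySem.List.pyRange 0 (PySem.Str.len s) 1).foldl
      (fun acc i => pvStepA acc (i, PySem.List.pyGetD s.toList i ' ')) ([], [])
      = (PySem.List.enumerate s.toList 0).foldl pvStepA ([], []) := by
    rw [PySem.List.enumerate_eq_map_pyRange s.toList ' ', List.foldl_map]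
    simp [PySem.Str.len_eq]
  rw [hmap]
  have hcore := A_loop s.toList 0 1 ((s.toList.length : Int) + 1) [] (by omega) (by omega)
  simp only at hcore
  rw [show pvAscStrs 1 (0 + 1) = [] from by
    rw [show ((0:Int) + 1) = 1 by ring]; exact pvAsc_nil 1] at hcore
  -- final flush at i = n
  simp only [List.foldl_cons, List.foldl_nil, PySem.Str.len_eq]
  simp only [true_or, if_true]
  rw [pvFlush_eq, hcore]
  simp

theorem B_eq_core (s : String) :
    arrange_guest_arrival_order_alt s = PySem.Str.join "" (pvCore s.toList 1 1) := by
  unfold arrange_guest_arrival_order_alt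
  simp only []
  have := B_loop s.toList 1 1 (PySem.Str.len s + 1) [] (by simp [PySem.Str.len_eq]; ring)
  simp only at this
  rw [this]
  simp

-- ===== VERDICT (by name: the statement is the Claim_ definition above) =====
theorem arrange_guest_arrival_order_spec : Claim_equal_arrange_guest_arrival_order := by
  intro s _
  unfold Spec_arrange_guest_arrival_order
  rw [A_eq_core, B_eq_core]
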